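-- pv_equiv track=rewrite | github.com/santi921/qtaim_generator | qtaim_gen/source/utils/manifest.py | hill_formula
-- ===== SOURCE A (Python) =====
-- from collections import Counter
-- from typing import Dict, Iterator, List, Optional, Tuple
--
-- def hill_formula(species: List[str]) -> str:
--     counts = Counter(species)
--     parts: List[str] = []
--     if "C" in counts:
--         c = counts.pop("C")
--         parts.append(f"C{c}" if c > 1 else "C")
--         if "H" in counts:
--             h = counts.pop("H")
--             parts.append(f"H{h}" if h > 1 else "H")
--     for el in sorted(counts):
--         n = counts[el]
--         parts.append(f"{el}{n}" if n > 1 else el)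
--     return "".join(parts)
-- ===== SOURCE B (Python) =====
-- def hill_formula(species):
--     # No counting dict: sort the whole multiset with a Hill-priority key,
--     # then run-length encode the sorted list in one scan.
--     has_c = "C" in species
--
--     def rank(el):
--         if el == "C":
--             return "0"
--         if el == "H" and has_c:
--             return "1"
--         return "2" + el
--
--     s = sorted(species, key=rank)
--     out = []
--     i = 0
--     while i < len(s):
--         j = i + 1
--         while j < len(s) and s[j] == s[i]:
--             j += 1
--         el = s[i]
--         out.append(el if j - i == 1 else f"{el}{j - i}")
--         i = j
--     return "".join(out)
-- ===== Notes on version B (the rewrite author's own statement) =====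
-- stated objective: alternative
-- what changed: Drops the Counter entirely: B sorts the full multiset of species with a Hill-priority key and run-length-encodes the sorted list in one scan, instead of A's count-dict with popped C/H special cases followed by a sort of the remaining distinct keys.
import Mathlib
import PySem

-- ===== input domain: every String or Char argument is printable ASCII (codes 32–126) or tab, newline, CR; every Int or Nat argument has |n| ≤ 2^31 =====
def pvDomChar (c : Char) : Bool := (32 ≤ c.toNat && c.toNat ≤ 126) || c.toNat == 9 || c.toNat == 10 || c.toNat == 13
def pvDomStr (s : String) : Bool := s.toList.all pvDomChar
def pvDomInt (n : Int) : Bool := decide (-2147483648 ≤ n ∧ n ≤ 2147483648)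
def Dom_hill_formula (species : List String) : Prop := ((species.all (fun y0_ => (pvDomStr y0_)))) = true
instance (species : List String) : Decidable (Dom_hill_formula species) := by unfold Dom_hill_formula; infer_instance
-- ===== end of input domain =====

-- B drops A's Counter: it sorts the full multiset with a Hill-priority key and
-- run-length-encodes the sorted list in one scan (objective: alternative algorithm).

-- ===== PORT A =====
def hill_formula (species : List String) : String :=
  let counts := PySem.Dict.counter species
  let parts : List String := []
  let (counts, parts) :=
    if counts.contains "C" then
      -- c = counts.pop("C")
      let c := counts.getD "C" 0
      let counts := counts.erase "C"
      let parts := parts ++ [if c > 1 then PySem.Str.join "" ["C", PySem.Int.toStr c] else "C"]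
      if counts.contains "H" then
        -- h = counts.pop("H")
        let h := counts.getD "H" 0
        let counts := counts.erase "H"
        let parts := parts ++ [if h > 1 then PySem.Str.join "" ["H", PySem.Int.toStr h] else "H"]
        (counts, parts)
      else (counts, parts)
    else (counts, parts)
  let parts := (PySem.List.sorted counts.keys (fun x => x) false).foldl
    (fun acc el =>
      let n := counts.getD el 0
      acc ++ [if n > 1 then PySem.Str.join "" [el, PySem.Int.toStr n] else el]) parts
  PySem.Str.join "" parts

-- ===== PORT B =====
-- rank(el): "0" for C, "1" for H when carbon is present, "2"+el otherwise
def hillRank (hasC : Bool) (el : String) : String :=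
  if el == "C" then "0"
  else if el == "H" && hasC then "1"
  else PySem.Str.join "" ["2", el]

-- the run-length-encoding while loop of Source B: find the current run, emit its piece, jump past it
def runEmit : List String → List String
  | [] => []
  | el :: rest =>
      let n : Int := 1 + ((rest.takeWhile (· == el)).length : Int)
      (if n == 1 then el else PySem.Str.join "" [el, PySem.Int.toStr n]) ::
        runEmit (rest.dropWhile (· == el))
  termination_by l => l.length
  decreasing_by
    simp only [List.length_cons]
    exact Nat.lt_succ_of_le (List.length_dropWhile_le _ _)

def hill_formula_alt (species : List String) : String :=
  let hasC := species.contains "C"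
  let s := PySem.List.sorted species (hillRank hasC) false
  PySem.Str.join "" (runEmit s)

-- ===== PRECONDITION & SPEC =====
def Spec_hill_formula (species : List String) (out : String) : Prop := out = hill_formula_alt species
instance (species : List String) (out : String) : Decidable (Spec_hill_formula species out) := by unfold Spec_hill_formula; infer_instance

-- ===== CLAIM (what is proved, stated in full; the proofs are below) =====
def Claim_equal_hill_formula : Prop := ∀ (species : List String), Dom_hill_formula species → Spec_hill_formula species (hill_formula species)

-- ===== LEMMAS AND PROOFS =====

-- the elements A's tail loop sees (kept after the C/H pops)
def hillP (hasC : Bool) (el : String) : Bool := !(el == "C") && !(el == "H" && hasC)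

theorem dict_getD_erase_of_ne {ν : Type} (d : PySem.Dict String ν) (k k' : String)
    (h : k' ≠ k) (v : ν) : (d.erase k).getD k' v = d.getD k' v := by
  obtain ⟨items⟩ := d
  simp only [PySem.Dict.erase, PySem.Dict.getD, PySem.Dict.get?]
  induction items with
  | nil => rfl
  | cons p t ih =>
    by_cases hk : p.1 = k
    · have hpk' : (p.1 == k') = false := beq_eq_false_iff_ne.mpr (by rw [hk]; exact Ne.symm h)
      rw [List.filter_cons_of_neg (by simp [hk]), List.find?_cons_of_neg (by simp [hpk']), ih]
    · by_cases hk' : p.1 = k'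
      · rw [List.filter_cons_of_pos (by simp [hk]),
          List.find?_cons_of_pos (by simp [hk']), List.find?_cons_of_pos (by simp [hk'])]
      · rw [List.filter_cons_of_pos (by simp [hk]),
          List.find?_cons_of_neg (by simp [hk']), List.find?_cons_of_neg (by simp [hk']), ih]

theorem dict_contains_erase_of_ne {ν : Type} (d : PySem.Dict String ν) (k k' : String)
    (h : k' ≠ k) : (d.erase k).contains k' = d.contains k' := by
  obtain ⟨items⟩ := d
  simp only [PySem.Dict.erase, PySem.Dict.contains]
  induction items with
  | nil => rfl
  | cons p t ih =>
    by_cases hk : p.1 = k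
    · have hpk' : (p.1 == k') = false := beq_eq_false_iff_ne.mpr (by rw [hk]; exact Ne.symm h)
      rw [List.filter_cons_of_neg (by simp [hk]), ih, List.any_cons, hpk']
      simp
    · rw [List.filter_cons_of_pos (by simp [hk]), List.any_cons, List.any_cons, ih]

theorem dict_keys_erase {ν : Type} (d : PySem.Dict String ν) (k : String) :
    (d.erase k).keys = d.keys.filter (fun x => !(x == k)) := by
  obtain ⟨items⟩ := d
  simp only [PySem.Dict.erase, PySem.Dict.keys]
  induction items with
  | nil => rfl
  | cons p t ih =>
    by_cases hk : p.1 = k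
    · rw [List.filter_cons_of_neg (by simp [hk]), List.map_cons,
        List.filter_cons_of_neg (by simp [hk]), ih]
    · rw [List.filter_cons_of_pos (by simp [hk]), List.map_cons, List.map_cons,
        List.filter_cons_of_pos (by simp [hk]), ih]

theorem toList_two (el : String) :
    (PySem.Str.join "" ["2", el]).toList = '2' :: el.toList := by
  simp [PySem.Str.join, PySem.Chars.join, List.intercalate]

theorem lt_0_1 : ("0" : String) < "1" := by
  rw [String.lt_iff_toList_lt]
  show ['0'] < ['1']
  rw [List.cons_lt_cons_iff]
  exact Or.inl (by decide)

theorem lt_0_two (el : String) : ("0" : String) < PySem.Str.join "" ["2", el] := by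
  rw [String.lt_iff_toList_lt, toList_two]
  show ['0'] < _
  rw [List.cons_lt_cons_iff]
  exact Or.inl (by decide)

theorem lt_1_two (el : String) : ("1" : String) < PySem.Str.join "" ["2", el] := by
  rw [String.lt_iff_toList_lt, toList_two]
  show ['1'] < _
  rw [List.cons_lt_cons_iff]
  exact Or.inl (by decide)

theorem two_lt_two {a b : String} (h : a < b) :
    PySem.Str.join "" ["2", a] < PySem.Str.join "" ["2", b] := by
  rw [String.lt_iff_toList_lt, toList_two, toList_two, List.cons_lt_cons_iff]
  exact Or.inr ⟨rfl, String.lt_iff_toList_lt.mp h⟩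

theorem rank_of_p {hasC : Bool} {el : String} (h : hillP hasC el = true) :
    hillRank hasC el = PySem.Str.join "" ["2", el] := by
  unfold hillP at h
  unfold hillRank
  simp only [Bool.and_eq_true, Bool.not_eq_true'] at h
  simp [h.1, h.2]

theorem ne_0_two (el : String) : ("0" : String) ≠ PySem.Str.join "" ["2", el] := by
  intro h
  have := congrArg String.toList h
  rw [toList_two] at this
  simp at this

theorem ne_1_two (el : String) : ("1" : String) ≠ PySem.Str.join "" ["2", el] := by
  intro h
  have := congrArg String.toList h
  rw [toList_two] at this
  simp at this

theorem two_inj {a b : String} (h : PySem.Str.join "" ["2", a] = PySem.Str.join "" ["2", b]) :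
    a = b := by
  have := congrArg String.toList h
  rw [toList_two, toList_two] at this
  exact String.toList_injective (List.cons.injEq _ _ _ _ ▸ this).2

theorem hillRank_inj (hasC : Bool) : Function.Injective (hillRank hasC) := by
  intro a b h
  unfold hillRank at h
  by_cases ha : a = "C" <;> by_cases hb : b = "C"
  · exact ha.trans hb.symm
  · subst ha
    simp only [beq_self_eq_true, if_true, beq_iff_eq, hb, if_false] at h
    by_cases hb2 : (b == "H" && hasC) = true
    · rw [if_pos hb2] at h
      exact absurd h (by decide)
    · rw [if_neg hb2] at h
      exact absurd h (ne_0_two b)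
  · subst hb
    simp only [beq_self_eq_true, if_true, beq_iff_eq, ha, if_false] at h
    by_cases ha2 : (a == "H" && hasC) = true
    · rw [if_pos ha2] at h
      exact absurd h (by decide)
    · rw [if_neg ha2] at h
      exact absurd h.symm (ne_0_two a)
  · simp only [beq_iff_eq, ha, hb, if_false] at h
    by_cases ha2 : (a == "H" && hasC) = true <;> by_cases hb2 : (b == "H" && hasC) = true
    · have h1 : a = "H" := beq_iff_eq.mp (Bool.and_eq_true _ _ ▸ ha2).1
      have h2 : b = "H" := beq_iff_eq.mp (Bool.and_eq_true _ _ ▸ hb2).1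
      exact h1.trans h2.symm
    · rw [if_pos ha2, if_neg hb2] at h
      exact absurd h (ne_1_two b)
    · rw [if_neg ha2, if_pos hb2] at h
      exact absurd h.symm (ne_1_two a)
    · rw [if_neg ha2, if_neg hb2] at h
      exact two_inj h

theorem sorted_tail_pairwise_lt (L : List String) (hnd : L.Nodup) :
    (PySem.List.sorted L (fun x => x) false).Pairwise (· < ·) := by
  have h1 := PySem.List.sorted_pairwise L (fun x => x)
  have h2 : (PySem.List.sorted L (fun x => x) false).Nodup :=
    ((PySem.List.sorted_perm L (fun x => x) false).nodup_iff).mpr hnd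
  exact (h1.and h2).imp (fun h => lt_of_le_of_ne h.1 h.2)

theorem sorted_rank_pairwise_lt (L : List String) (hnd : L.Nodup) (hasC : Bool) :
    (PySem.List.sorted L (hillRank hasC) false).Pairwise
      (fun a b => hillRank hasC a < hillRank hasC b) := by
  have h1 := PySem.List.sorted_pairwise L (hillRank hasC)
  have h2 : (PySem.List.sorted L (hillRank hasC) false).Nodup :=
    ((PySem.List.sorted_perm L (hillRank hasC) false).nodup_iff).mpr hnd
  exact (h1.and h2).imp (fun h => lt_of_le_of_ne h.1 (fun e => h.2 (hillRank_inj hasC e)))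

-- the core fact about A: the rank-keyed sort of the distinct keys is A's C/H front
-- matter followed by the plain sort of the rest
theorem rank_sorted (K : List String) (hnd : K.Nodup) (hasC hasH : Bool)
    (hC : ("C" ∈ K) ↔ hasC = true) (hH : ("H" ∈ K) ↔ hasH = true) :
    PySem.List.sorted K (hillRank hasC) false =
      (if hasC then ["C"] else []) ++ (if hasC && hasH then ["H"] else []) ++
      PySem.List.sorted (K.filter (hillP hasC)) (fun x => x) false := by
  have hndf : (K.filter (hillP hasC)).Nodup := hnd.filter _
  have hndS : (PySem.List.sorted (K.filter (hillP hasC)) (fun x => x) false).Nodup :=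
    ((PySem.List.sorted_perm _ _ false).nodup_iff).mpr hndf
  have hmemS : ∀ x, x ∈ PySem.List.sorted (K.filter (hillP hasC)) (fun x => x) false ↔
      (x ∈ K ∧ hillP hasC x = true) := by
    intro x
    rw [PySem.List.mem_sorted, List.mem_filter]
  have hpS : (PySem.List.sorted (K.filter (hillP hasC)) (fun x => x) false).Pairwise
      (fun a b => hillRank hasC a < hillRank hasC b) := by
    refine ((sorted_tail_pairwise_lt _ hndf).imp_of_mem ?_)
    intro a b ha hb hab
    rw [rank_of_p ((hmemS a).mp ha).2, rank_of_p ((hmemS b).mp hb).2]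
    exact two_lt_two hab
  have hCnotS : "C" ∉ PySem.List.sorted (K.filter (hillP hasC)) (fun x => x) false := by
    intro hmem
    have := ((hmemS "C").mp hmem).2
    simp [hillP] at this
  cases hasC with
  | false =>
    rw [if_neg (by decide), Bool.false_and, if_neg (by decide), List.nil_append, List.nil_append]
    apply PySem.List.sorted_eq_of_perm_of_pairwise_lt _ _ _ ?_ hpS
    apply (List.perm_ext_iff_of_nodup hndS hnd).mpr
    intro x
    rw [hmemS]
    constructor
    · exact And.left
    · intro hx
      have hxC : x ≠ "C" := by rintro rfl; exact absurd (hC.mp hx) (by decide)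
      exact ⟨hx, by simp [hillP, hxC]⟩
  | true =>
    rw [if_pos rfl, Bool.true_and]
    have hCK : "C" ∈ K := hC.mpr rfl
    have hHnotS : "H" ∉ PySem.List.sorted (K.filter (hillP true)) (fun x => x) false := by
      intro hmem
      have := ((hmemS "H").mp hmem).2
      simp [hillP] at this
    cases hasH with
    | false =>
      rw [if_neg (by decide)]
      show PySem.List.sorted K (hillRank true) false =
        "C" :: PySem.List.sorted (K.filter (hillP true)) (fun x => x) false
      apply PySem.List.sorted_eq_of_perm_of_pairwise_lt _ _ _ ?_ ?_
      · apply (List.perm_ext_iff_of_nodup (List.nodup_cons.mpr ⟨hCnotS, hndS⟩) hnd).mpr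
        intro x
        rw [List.mem_cons, hmemS]
        constructor
        · rintro (rfl | h)
          · exact hCK
          · exact h.1
        · intro hx
          by_cases hxc : x = "C"
          · exact Or.inl hxc
          · have hxh : x ≠ "H" := by rintro rfl; exact absurd (hH.mp hx) (by decide)
            exact Or.inr ⟨hx, by simp [hillP, hxc, hxh]⟩
      · rw [List.pairwise_cons]
        refine ⟨?_, hpS⟩
        intro b hb
        rw [show hillRank true "C" = "0" by decide, rank_of_p ((hmemS b).mp hb).2]
        exact lt_0_two b
    | true =>
      rw [if_pos rfl]
      show PySem.List.sorted K (hillRank true) false =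
        "C" :: "H" :: PySem.List.sorted (K.filter (hillP true)) (fun x => x) false
      have hHK : "H" ∈ K := hH.mpr rfl
      apply PySem.List.sorted_eq_of_perm_of_pairwise_lt _ _ _ ?_ ?_
      · refine (List.perm_ext_iff_of_nodup ?_ hnd).mpr ?_
        · refine List.nodup_cons.mpr ⟨?_, List.nodup_cons.mpr ⟨hHnotS, hndS⟩⟩
          rw [List.mem_cons]
          rintro (hch | hmem)
          · exact absurd hch (by decide)
          · exact hCnotS hmem
        · intro x
          rw [List.mem_cons, List.mem_cons, hmemS]
          constructor
          · rintro (rfl | rfl | h)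
            · exact hCK
            · exact hHK
            · exact h.1
          · intro hx
            by_cases hxc : x = "C"
            · exact Or.inl hxc
            · by_cases hxh : x = "H"
              · exact Or.inr (Or.inl hxh)
              · exact Or.inr (Or.inr ⟨hx, by simp [hillP, hxc, hxh]⟩)
      · rw [List.pairwise_cons, List.pairwise_cons]
        refine ⟨?_, ?_, hpS⟩
        · intro b hb
          rw [List.mem_cons] at hb
          rcases hb with rfl | hb
          · exact lt_0_1
          · rw [show hillRank true "C" = "0" by decide, rank_of_p ((hmemS b).mp hb).2]
            exact lt_0_two b
        · intro b hb
          rw [show hillRank true "H" = "1" by decide, rank_of_p ((hmemS b).mp hb).2]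
          exact lt_1_two b

theorem mem_tail_p {K : List String} {hasC : Bool} {x : String}
    (hx : x ∈ PySem.List.sorted (K.filter (hillP hasC)) (fun x => x) false) :
    hillP hasC x = true :=
  (List.mem_filter.mp ((PySem.List.mem_sorted _ _ _ _).mp hx)).2

theorem hillP_true_ne {x : String} (h : hillP true x = true) : x ≠ "C" ∧ x ≠ "H" := by
  simpa [hillP] using h

-- A's canonical form: join of the formatted counts over the rank-keyed sort of the keys
theorem A_canon (species : List String) :
    hill_formula species =
      PySem.Str.join ""
        ((PySem.List.sorted (PySem.Dict.counter species).keys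
            (hillRank ((PySem.Dict.counter species).contains "C")) false).map
          (fun el =>
            if (PySem.Dict.counter species).getD el 0 > 1
            then PySem.Str.join "" [el, PySem.Int.toStr ((PySem.Dict.counter species).getD el 0)]
            else el)) := by
  unfold hill_formula
  have hnd : (PySem.Dict.counter species).keys.Nodup := PySem.Dict.nodup_keys_counter species
  by_cases hc : (PySem.Dict.counter species).contains "C" = true
  · have hCm : ("C" ∈ (PySem.Dict.counter species).keys) ↔ true = true :=
      ⟨fun _ => rfl, fun _ => (PySem.Dict.contains_iff_mem_keys _ _).mp hc⟩
    by_cases hh : (PySem.Dict.counter species).contains "H" = true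
    · have hh' : ((PySem.Dict.counter species).erase "C").contains "H" = true := by
        rw [dict_contains_erase_of_ne _ _ _ (by decide)]; exact hh
      have hHm : ("H" ∈ (PySem.Dict.counter species).keys) ↔ true = true :=
        ⟨fun _ => rfl, fun _ => (PySem.Dict.contains_iff_mem_keys _ _).mp hh⟩
      simp only [hc, hh', reduceIte]
      rw [rank_sorted _ hnd true true hCm hHm]
      rw [PySem.List.foldl_append_singleton_eq_map]
      rw [dict_getD_erase_of_ne _ _ _ (by decide)]
      rw [dict_keys_erase, dict_keys_erase, List.filter_filter]
      have hpred : ∀ x ∈ (PySem.Dict.counter species).keys,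
          ((!(x == "H")) && (!(x == "C"))) = hillP true x := by
        intro x _
        simp [hillP, Bool.and_comm]
      rw [List.filter_congr hpred]
      simp only [List.nil_append, List.cons_append]
      congr 1
      congr 2
      apply List.map_congr_left
      intro el hel
      obtain ⟨hnc, hnh⟩ := hillP_true_ne (mem_tail_p hel)
      rw [dict_getD_erase_of_ne _ _ _ hnh, dict_getD_erase_of_ne _ _ _ hnc]
    · have hh' : ((PySem.Dict.counter species).erase "C").contains "H" = false := by
        rw [dict_contains_erase_of_ne _ _ _ (by decide)]
        exact Bool.not_eq_true _ ▸ hh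
      have hHm : ("H" ∈ (PySem.Dict.counter species).keys) ↔ false = true := by
        constructor
        · intro hmem
          exact absurd ((PySem.Dict.contains_iff_mem_keys _ _).mpr hmem) hh
        · intro h
          exact absurd h (by decide)
      simp only [hc, hh', Bool.false_eq_true, if_true, if_false]
      rw [rank_sorted _ hnd true false hCm hHm]
      rw [PySem.List.foldl_append_singleton_eq_map]
      rw [dict_keys_erase]
      have hpred : ∀ x ∈ (PySem.Dict.counter species).keys,
          (!(x == "C")) = hillP true x := by
        intro x hx
        have hxh : x ≠ "H" := by
          rintro rfl
          exact absurd hx (fun hm => absurd ((PySem.Dict.contains_iff_mem_keys _ _).mpr hm) hh)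
        simp [hillP, hxh]
      rw [List.filter_congr hpred]
      simp only [List.nil_append, List.cons_append]
      congr 2
      apply List.map_congr_left
      intro el hel
      obtain ⟨hnc, _⟩ := hillP_true_ne (mem_tail_p hel)
      rw [dict_getD_erase_of_ne _ _ _ hnc]
  · have hc' : (PySem.Dict.counter species).contains "C" = false := Bool.not_eq_true _ ▸ hc
    have hCm : ("C" ∈ (PySem.Dict.counter species).keys) ↔ false = true := by
      constructor
      · intro hmem
        exact absurd ((PySem.Dict.contains_iff_mem_keys _ _).mpr hmem) hc
      · intro h
        exact absurd h (by decide)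
    have hHm : ("H" ∈ (PySem.Dict.counter species).keys) ↔
        ((PySem.Dict.counter species).contains "H") = true :=
      (PySem.Dict.contains_iff_mem_keys _ _).symm
    simp only [hc']
    rw [rank_sorted _ hnd false _ hCm hHm]
    rw [PySem.List.foldl_append_singleton_eq_map]
    have hfilter : (PySem.Dict.counter species).keys.filter (hillP false) =
        (PySem.Dict.counter species).keys := by
      apply List.filter_eq_self.mpr
      intro x hx
      have hxc : x ≠ "C" := by
        rintro rfl
        exact absurd ((PySem.Dict.contains_iff_mem_keys _ _).mpr hx) hc
      simp [hillP, hxc]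
    rw [hfilter]
    simp

-- ---- B side: the full-multiset sort is the concatenation of the key runs ----

theorem count_flatMap (K : List String) (c : String → Nat) (hnd : K.Nodup) (x : String) :
    (K.flatMap fun el => List.replicate (c el) el).count x = if x ∈ K then c x else 0 := by
  induction K with
  | nil => simp
  | cons el K' ih =>
    rw [List.flatMap_cons, List.count_append, ih (List.nodup_cons.mp hnd).2]
    by_cases hx : x = el
    · subst hx
      have : x ∉ K' := (List.nodup_cons.mp hnd).1
      simp [this]
    · simp [List.count_replicate, Ne.symm hx, hx, List.mem_cons]

theorem perm_flatMap_count (xs K : List String) (hnd : K.Nodup)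
    (hmem : ∀ x, x ∈ K ↔ x ∈ xs) :
    (K.flatMap fun el => List.replicate (xs.count el) el).Perm xs := by
  rw [List.perm_iff_count]
  intro x
  rw [count_flatMap _ _ hnd]
  by_cases hx : x ∈ K
  · simp [hx]
  · have : x ∉ xs := fun h => hx ((hmem x).mpr h)
    simp [hx, List.count_eq_zero_of_not_mem this]

theorem pairwise_flatMap_replicate (K : List String) (c : String → Nat) (hasC : Bool)
    (hp : K.Pairwise (fun a b => hillRank hasC a < hillRank hasC b)) :
    (K.flatMap fun el => List.replicate (c el) el).Pairwise
      (fun a b => hillRank hasC a ≤ hillRank hasC b) := by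
  induction K with
  | nil => simp
  | cons el K' ih =>
    rw [List.flatMap_cons, List.pairwise_append]
    obtain ⟨hhead, htail⟩ := List.pairwise_cons.mp hp
    refine ⟨?_, ih htail, ?_⟩
    · exact List.pairwise_replicate.mpr (Or.inr (le_refl _))
    · intro a ha b hb
      rw [List.eq_of_mem_replicate ha]
      obtain ⟨k, hk, hbk⟩ := List.mem_flatMap.mp hb
      rw [List.eq_of_mem_replicate hbk]
      exact le_of_lt (hhead k hk)

theorem takeWhile_eq_nil_of_forall {α : Type} (p : α → Bool) (l : List α)
    (h : ∀ x ∈ l, p x = false) : l.takeWhile p = [] := by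
  cases l with
  | nil => rfl
  | cons a t => simp [h a (List.mem_cons_self)]

theorem dropWhile_eq_self_of_forall {α : Type} (p : α → Bool) (l : List α)
    (h : ∀ x ∈ l, p x = false) : l.dropWhile p = l := by
  cases l with
  | nil => rfl
  | cons a t => simp [h a (List.mem_cons_self)]

theorem takeWhile_replicate_append (el : String) (m : Nat) (rest : List String) :
    ((List.replicate m el ++ rest).takeWhile (· == el)) =
      List.replicate m el ++ rest.takeWhile (· == el) := by
  induction m with
  | zero => simp
  | succ k ih => simp [List.replicate_succ, ih]

theorem dropWhile_replicate_append (el : String) (m : Nat) (rest : List String) :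
    ((List.replicate m el ++ rest).dropWhile (· == el)) = rest.dropWhile (· == el) := by
  induction m with
  | zero => simp
  | succ k ih => simp [List.replicate_succ, ih]

-- run-length encoding of a concatenation of runs over pairwise-distinct keys
theorem runEmit_flatMap (K : List String) (c : String → Nat)
    (hpos : ∀ el ∈ K, 1 ≤ c el) (hnd : K.Pairwise (· ≠ ·)) :
    runEmit (K.flatMap fun el => List.replicate (c el) el) =
      K.map (fun el =>
        if ((c el : Int)) == 1 then el
        else PySem.Str.join "" [el, PySem.Int.toStr (c el : Int)]) := by
  induction K with
  | nil => simp [runEmit]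
  | cons el K' ih =>
    obtain ⟨hne, hnd'⟩ := List.pairwise_cons.mp hnd
    have hne' : ∀ x ∈ (K'.flatMap fun e => List.replicate (c e) e), (x == el) = false := by
      intro x hx
      obtain ⟨k, hk, hxk⟩ := List.mem_flatMap.mp hx
      rw [List.eq_of_mem_replicate hxk]
      exact beq_eq_false_iff_ne.mpr (Ne.symm (hne k hk))
    have hc1 : 1 ≤ c el := hpos el List.mem_cons_self
    rw [List.flatMap_cons]
    have hrep : List.replicate (c el) el = el :: List.replicate (c el - 1) el := by
      rw [← List.replicate_succ]
      congr 1
      omega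
    rw [hrep, List.cons_append, runEmit]
    rw [takeWhile_replicate_append, takeWhile_eq_nil_of_forall _ _ hne',
      dropWhile_replicate_append, dropWhile_eq_self_of_forall _ _ hne']
    rw [ih (fun e he => hpos e (List.mem_cons_of_mem _ he)) hnd']
    rw [List.map_cons]
    congr 1
    simp only [List.append_nil, List.length_replicate]
    have : (1 : Int) + ((c el - 1 : Nat) : Int) = (c el : Int) := by omega
    rw [this]

-- ===== VERDICT (by name: the statement is the Claim_ definition above) =====
theorem hill_formula_spec : Claim_equal_hill_formula := by
  intro species _
  unfold Spec_hill_formula hill_formula_alt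
  show hill_formula species =
    PySem.Str.join "" (runEmit (PySem.List.sorted species (hillRank (species.contains "C")) false))
  rw [← PySem.Dict.contains_counter species "C"]
  rw [A_canon]
  have hnd : (PySem.Dict.counter species).keys.Nodup := PySem.Dict.nodup_keys_counter species
  set hasC := (PySem.Dict.counter species).contains "C" with hhasC
  set K := PySem.List.sorted (PySem.Dict.counter species).keys (hillRank hasC) false with hK
  have hndK : K.Nodup := ((PySem.List.sorted_perm _ _ false).nodup_iff).mpr hnd
  have hpK : K.Pairwise (fun a b => hillRank hasC a < hillRank hasC b) :=
    sorted_rank_pairwise_lt _ hnd hasC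
  have hmemK : ∀ x, x ∈ K ↔ x ∈ species := by
    intro x
    rw [hK, PySem.List.mem_sorted, PySem.Dict.keys_counter, PySem.Set.mem_ofList]
  -- the full-multiset sort is the concatenation of the runs over K
  have hsort : PySem.List.sorted species (hillRank hasC) false =
      K.flatMap fun el => List.replicate (species.count el) el := by
    have hperm : (K.flatMap fun el => List.replicate (species.count el) el).Perm species :=
      perm_flatMap_count species K hndK hmemK
    rw [PySem.List.sorted_eq_sorted_of_perm species _ (hillRank hasC) (hillRank_inj hasC)
      hperm.symm]
    exact PySem.List.sorted_eq_self_of_pairwise _ _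
      (pairwise_flatMap_replicate K _ hasC hpK)
  rw [hsort]
  rw [runEmit_flatMap K _ (fun el hel => List.count_pos_iff.mpr ((hmemK el).mp hel))
    (hndK.imp (fun h => h))]
  congr 1
  apply List.map_congr_left
  intro el hel
  have hposel : 1 ≤ species.count el := List.count_pos_iff.mpr ((hmemK el).mp hel)
  rw [PySem.Dict.getD_counter]
  by_cases h1 : species.count el = 1
  · simp [h1]
  · have hgt : ((species.count el : Int)) > 1 := by omega
    have hne1 : (((species.count el : Int)) == 1) = false := by
      simp only [beq_eq_false_iff_ne]
      omega
    simp only [hne1, hgt, if_true]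
    simp
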